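-- pv_equiv track=rewrite | github.com/ameliahardy/124-pa7-transcripts | grading-for-167603454/chatbot.py | generate_negation
-- ===== SOURCE A (Python) =====
-- def generate_negation(words):
--     NEG_WORDS = ['never', 'not']
--     negation = []
--     neg_status = False
--     for w in words:
--         negation.append(-1 if neg_status else 1)
--         if w in NEG_WORDS:
--             neg_status = not neg_status
--     return negation
-- ===== SOURCE B (Python) =====
-- def generate_negation(words):
--     cuts = [i + 1 for i, w in enumerate(words) if w in ('never', 'not')]
--     out = []
--     sign = 1
--     prev = 0
--     for c in cuts + [len(words)]:
--         out.extend([sign] * (c - prev))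
--         sign = -sign
--         prev = c
--     return out
-- ===== Notes on version B (the rewrite author's own statement) =====
-- stated objective: alternative
-- what changed: Instead of A's per-word loop toggling a boolean, B first locates the flip points (index after each negation word) and then emits the result as constant-sign runs between consecutive flip points, alternating the sign per run.
import Mathlib
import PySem

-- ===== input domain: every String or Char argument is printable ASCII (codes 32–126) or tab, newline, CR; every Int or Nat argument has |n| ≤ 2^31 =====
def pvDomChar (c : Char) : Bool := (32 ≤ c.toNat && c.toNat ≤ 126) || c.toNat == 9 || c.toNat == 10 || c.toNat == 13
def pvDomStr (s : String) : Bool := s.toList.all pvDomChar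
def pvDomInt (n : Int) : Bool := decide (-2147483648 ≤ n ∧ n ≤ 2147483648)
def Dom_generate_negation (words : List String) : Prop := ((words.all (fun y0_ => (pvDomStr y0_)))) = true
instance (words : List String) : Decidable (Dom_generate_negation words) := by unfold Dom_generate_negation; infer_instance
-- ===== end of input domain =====

-- B replaces A's per-word loop with a toggled boolean by a run-based construction: it locates the flip points (index after each negation word) and emits constant-sign runs between consecutive flip points (alternative decomposition, same cost).

-- ===== PORT A =====
-- A's for-loop: state = (accumulated negation list, neg_status)
def pvALoop : List String → List Int → Bool → List Int
  | [], negation, _ => negation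
  | w :: ws, negation, neg_status =>
      pvALoop ws (negation ++ [if neg_status then -1 else 1])
        (if w = "never" ∨ w = "not" then !neg_status else neg_status)

def generate_negation (words : List String) : List Int :=
  pvALoop words [] false

-- ===== PORT B =====
-- '[i + 1 for i, w in enumerate(words) if w in ('never', 'not')]': the enumerate-comprehension
-- ported by hand as a recursion carrying the running index i (exact: indices are 0,1,2,… and never negative)
def pvCutsFrom : Nat → List String → List Nat
  | _, [] => []
  | i, w :: ws => (if w = "never" ∨ w = "not" then [i + 1] else []) ++ pvCutsFrom (i + 1) ws

-- B's for-loop over 'cuts + [len(words)]': state = (out, sign, prev); '[sign] * (c - prev)' is List.replicate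
def pvBLoop : List Nat → List Int → Int → Nat → List Int
  | [], out, _, _ => out
  | c :: cs, out, sign, prev => pvBLoop cs (out ++ List.replicate (c - prev) sign) (-sign) c

def generate_negation_alt (words : List String) : List Int :=
  pvBLoop (pvCutsFrom 0 words ++ [words.length]) [] 1 0

-- ===== PRECONDITION & SPEC =====
def Spec_generate_negation (words : List String) (out : List Int) : Prop := out = generate_negation_alt words
instance (words : List String) (out : List Int) : Decidable (Spec_generate_negation words out) := by unfold Spec_generate_negation; infer_instance

-- ===== CLAIM (what is proved, stated in full; the proofs are below) =====
def Claim_equal_generate_negation : Prop := ∀ (words : List String), Dom_generate_negation words → Spec_generate_negation words (generate_negation words)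

-- ===== LEMMAS AND PROOFS =====

-- the accumulator of B's loop factors out
theorem pvBLoop_acc (cs : List Nat) (out : List Int) (s : Int) (prev : Nat) :
    pvBLoop cs out s prev = out ++ pvBLoop cs [] s prev := by
  induction cs generalizing out s prev with
  | nil => simp [pvBLoop]
  | cons c cs ih =>
      simp only [pvBLoop, List.nil_append]
      rw [ih, ih (List.replicate (c - prev) s), List.append_assoc]

-- B's loop only uses differences of cut points: shifting all cuts and prev by 1 changes nothing
theorem pvBLoop_shift (cs : List Nat) (out : List Int) (s : Int) (prev : Nat) :
    pvBLoop (cs.map (· + 1)) out s (prev + 1) = pvBLoop cs out s prev := by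
  induction cs generalizing out s prev with
  | nil => simp [pvBLoop]
  | cons c cs ih =>
      simp only [List.map_cons, pvBLoop, Nat.add_sub_add_right]
      exact ih _ _ _

-- flipping the starting sign negates B's loop output pointwise
theorem pvBLoop_neg (cs : List Nat) (s : Int) (prev : Nat) :
    pvBLoop cs [] (-s) prev = (pvBLoop cs [] s prev).map (fun x => -x) := by
  induction cs generalizing s prev with
  | nil => simp [pvBLoop]
  | cons c cs ih =>
      have h := ih (-s) c
      rw [neg_neg] at h
      simp only [pvBLoop, List.nil_append, neg_neg]
      rw [pvBLoop_acc, pvBLoop_acc cs (List.replicate (c - prev) s), h]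
      simp

-- shifting all indices of the comprehension by 1 shifts every cut by 1
theorem pvCutsFrom_shift (ws : List String) (i : Nat) :
    pvCutsFrom (i + 1) ws = (pvCutsFrom i ws).map (· + 1) := by
  induction ws generalizing i with
  | nil => simp [pvCutsFrom]
  | cons w ws ih =>
      by_cases hw : w = "never" ∨ w = "not" <;>
        simp [pvCutsFrom, hw, ih (i + 1)]

-- a run starting at 0 with a shifted cut list = emit one sign, then the unshifted run
theorem pvBLoop_head (c : Nat) (cs : List Nat) (out : List Int) (s : Int) :
    pvBLoop ((c :: cs).map (· + 1)) out s 0 = pvBLoop (c :: cs) (out ++ [s]) s 0 := by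
  simp only [List.map_cons, pvBLoop, Nat.sub_zero]
  rw [pvBLoop_shift]
  simp [List.replicate_succ]

-- B's recursion equation: sign 1 at the head, tail negated iff the head is a negation word
theorem alt_cons (w : String) (ws : List String) :
    generate_negation_alt (w :: ws) =
      1 :: (if w = "never" ∨ w = "not"
            then (generate_negation_alt ws).map (fun x => -x)
            else generate_negation_alt ws) := by
  unfold generate_negation_alt
  have hmap : pvCutsFrom 1 ws ++ [ws.length + 1] = (pvCutsFrom 0 ws ++ [ws.length]).map (· + 1) := by
    simp [pvCutsFrom_shift ws 0]
  by_cases hw : w = "never" ∨ w = "not"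
  · simp only [pvCutsFrom, hw, if_pos, List.length_cons, List.cons_append, List.nil_append,
      Nat.reduceAdd]
    rw [pvBLoop]
    simp only [List.nil_append, Nat.sub_zero, List.replicate_one]
    have hs : pvBLoop ((pvCutsFrom 0 ws ++ [ws.length]).map (· + 1)) [1] (-1) 1
        = pvBLoop (pvCutsFrom 0 ws ++ [ws.length]) [1] (-1) 0 := pvBLoop_shift _ _ _ 0
    have hn : pvBLoop (pvCutsFrom 0 ws ++ [ws.length]) [] (-1) 0
        = (pvBLoop (pvCutsFrom 0 ws ++ [ws.length]) [] 1 0).map (fun x => -x) := pvBLoop_neg _ 1 0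
    rw [hmap, hs, pvBLoop_acc, hn]
    simp
  · simp only [pvCutsFrom, hw, List.nil_append, List.length_cons, if_false, Nat.reduceAdd]
    rw [hmap]
    cases hL : pvCutsFrom 0 ws ++ [ws.length] with
    | nil => exact absurd hL (by simp)
    | cons c cs =>
        rw [pvBLoop_head, pvBLoop_acc, ← hL]
        simp

-- A's loop invariant: with status b it produces acc ++ B's result, pointwise negated iff b
theorem pvALoop_eq_alt (ws : List String) (acc : List Int) (b : Bool) :
    pvALoop ws acc b =
      acc ++ (if b then (generate_negation_alt ws).map (fun x => -x) else generate_negation_alt ws) := by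
  induction ws generalizing acc b with
  | nil => cases b <;> simp [pvALoop, generate_negation_alt, pvCutsFrom, pvBLoop]
  | cons w ws ih =>
    simp only [pvALoop]
    rw [ih, alt_cons]
    by_cases hw : w = "never" ∨ w = "not" <;> cases b <;>
      simp [hw, List.map_map]

-- ===== VERDICT (by name: the statement is the Claim_ definition above) =====
theorem generate_negation_spec : Claim_equal_generate_negation := by
  intro words _
  unfold Spec_generate_negation generate_negation
  simpa using pvALoop_eq_alt words [] false
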